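-- pv_equiv track=rewrite | github.com/rapidpandamovers/rapidpandamovers-website | scripts/fix_spanish_body_links.py | translate_link
-- ===== SOURCE A (Python) =====
-- SERVICE_MAP = {
--     'packing-services': 'servicios-de-empaque',
--     'local-moving': 'mudanza-local',
--     'long-distance-moving': 'mudanza-de-larga-distancia',
--     'residential-moving': 'mudanza-residencial',
--     'commercial-moving': 'mudanza-comercial',
--     'furniture-moving': 'mudanza-de-muebles',
--     'celebrity-moving': 'mudanza-de-celebridades',
--     'apartment-moving': 'mudanza-de-apartamentos',
--     'full-service-moving': 'mudanza-de-servicio-completo',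
--     'labor-only-moving': 'mudanza-solo-mano-de-obra',
--     'military-moving': 'mudanza-militar',
--     'same-day-moving': 'mudanza-del-mismo-dia',
--     'senior-moving': 'mudanza-para-personas-mayores',
--     'student-moving': 'mudanza-estudiantil',
--     'safe-moving': 'mudanza-de-cajas-fuertes',
--     'antique-moving': 'mudanza-de-antiguedades',
--     'office-moving': 'mudanza-de-oficinas',
--     'same-building-moving': 'mudanza-dentro-del-mismo-edificio',
--     'last-minute-moving': 'mudanza-de-ultimo-momento',
--     'hourly-moving': 'mudanza-por-hora',
--     'special-needs-moving': 'mudanza-para-necesidades-especiales',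
--     'appliance-moving': 'mudanza-de-electrodomesticos',
--     'piano-moving': 'mudanza-de-pianos',
--     'pool-table-moving': 'mudanza-de-mesas-de-billar',
--     'hot-tub-moving': 'mudanza-de-jacuzzis',
--     'art-moving': 'mudanza-de-arte',
--     'white-glove-moving': 'mudanza-de-guante-blanco',
--     'specialty-item-moving': 'mudanza-de-articulos-especiales',
--     'storage-solutions': 'soluciones-de-almacenamiento',
--     'junk-removal': 'retiro-de-basura',
--     # Additional service aliases that appear in links
--     'long-distance': 'mudanza-de-larga-distancia',
--     'furniture-assembly': 'ensamblaje-de-muebles',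
--     'heavy-item-moving': 'mudanza-de-articulos-pesados',
-- }
--
-- STATIC_MAP = {
--     'about-us': 'sobre-nosotros',
--     'contact-us': 'contacto',
--     'quote': 'cotizacion',
--     'reservations': 'reservaciones',
--     'services': 'servicios',
--     'locations': 'ubicaciones',
--     'reviews': 'resenas',
--     'faq': 'preguntas-frecuentes',
--     'moving-rates': 'tarifas-de-mudanza',
--     'moving-routes': 'rutas-de-mudanza',
--     'moving-tips': 'consejos-de-mudanza',
--     'moving-checklist': 'lista-de-mudanza',
--     'moving-glossary': 'glosario-de-mudanza',
--     'why-choose-us': 'por-que-elegirnos',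
--     'compare': 'comparar',
--     'alternatives': 'alternativas',
--     'privacy': 'privacidad',
--     'terms': 'terminos',
-- }
--
-- def translate_link(path: str) -> str:
--     """Translate an English link path to Spanish."""
--     # Remove leading slash for matching
--     slug = path.lstrip('/')
--
--     # 1. Exact static page match
--     if slug in STATIC_MAP:
--         return '/' + STATIC_MAP[slug]
--
--     # 2. Exact service match
--     if slug in SERVICE_MAP:
--         return '/' + SERVICE_MAP[slug]
--
--     # 3. Location-movers pattern: "{location}-movers" -> "mudanzas-{location}"
--     if slug.endswith('-movers'):
--         location = slug[:-7]  # strip "-movers"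
--         return '/mudanzas-' + location
--
--     # 4. Location-service combo: "{location}-{service}" -> "{location}-{spanish-service}"
--     #    Sort by service slug length descending to match longest first
--     for en_service, es_service in sorted(SERVICE_MAP.items(), key=lambda x: len(x[0]), reverse=True):
--         if slug.endswith('-' + en_service):
--             location = slug[:-(len(en_service) + 1)]
--             return '/' + location + '-' + es_service
--
--     # No match - return unchanged
--     return path
-- ===== SOURCE B (Python) =====
-- SERVICE_MAP = {
--     'packing-services': 'servicios-de-empaque',
--     'local-moving': 'mudanza-local',
--     'long-distance-moving': 'mudanza-de-larga-distancia',
--     'residential-moving': 'mudanza-residencial',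
--     'commercial-moving': 'mudanza-comercial',
--     'furniture-moving': 'mudanza-de-muebles',
--     'celebrity-moving': 'mudanza-de-celebridades',
--     'apartment-moving': 'mudanza-de-apartamentos',
--     'full-service-moving': 'mudanza-de-servicio-completo',
--     'labor-only-moving': 'mudanza-solo-mano-de-obra',
--     'military-moving': 'mudanza-militar',
--     'same-day-moving': 'mudanza-del-mismo-dia',
--     'senior-moving': 'mudanza-para-personas-mayores',
--     'student-moving': 'mudanza-estudiantil',
--     'safe-moving': 'mudanza-de-cajas-fuertes',
--     'antique-moving': 'mudanza-de-antiguedades',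
--     'office-moving': 'mudanza-de-oficinas',
--     'same-building-moving': 'mudanza-dentro-del-mismo-edificio',
--     'last-minute-moving': 'mudanza-de-ultimo-momento',
--     'hourly-moving': 'mudanza-por-hora',
--     'special-needs-moving': 'mudanza-para-necesidades-especiales',
--     'appliance-moving': 'mudanza-de-electrodomesticos',
--     'piano-moving': 'mudanza-de-pianos',
--     'pool-table-moving': 'mudanza-de-mesas-de-billar',
--     'hot-tub-moving': 'mudanza-de-jacuzzis',
--     'art-moving': 'mudanza-de-arte',
--     'white-glove-moving': 'mudanza-de-guante-blanco',
--     'specialty-item-moving': 'mudanza-de-articulos-especiales',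
--     'storage-solutions': 'soluciones-de-almacenamiento',
--     'junk-removal': 'retiro-de-basura',
--     'long-distance': 'mudanza-de-larga-distancia',
--     'furniture-assembly': 'ensamblaje-de-muebles',
--     'heavy-item-moving': 'mudanza-de-articulos-pesados',
-- }
--
-- STATIC_MAP = {
--     'about-us': 'sobre-nosotros',
--     'contact-us': 'contacto',
--     'quote': 'cotizacion',
--     'reservations': 'reservaciones',
--     'services': 'servicios',
--     'locations': 'ubicaciones',
--     'reviews': 'resenas',
--     'faq': 'preguntas-frecuentes',
--     'moving-rates': 'tarifas-de-mudanza',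
--     'moving-routes': 'rutas-de-mudanza',
--     'moving-tips': 'consejos-de-mudanza',
--     'moving-checklist': 'lista-de-mudanza',
--     'moving-glossary': 'glosario-de-mudanza',
--     'why-choose-us': 'por-que-elegirnos',
--     'compare': 'comparar',
--     'alternatives': 'alternativas',
--     'privacy': 'privacidad',
--     'terms': 'terminos',
-- }
--
--
-- def translate_link(path: str) -> str:
--     """Translate an English link path to Spanish."""
--     slug = path.lstrip('/')
--
--     if slug in STATIC_MAP:
--         return '/' + STATIC_MAP[slug]
--
--     # No SERVICE_MAP key ends in '-movers', so this branch may safely come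
--     # before the service lookup below.
--     if slug.endswith('-movers'):
--         return '/mudanzas-' + slug[:-7]
--
--     # Candidate suffixes, longest first: the whole slug (the exact service
--     # match) and then the part after each dash, left to right.  The first
--     # SERVICE_MAP hit is therefore the longest-key match, with one O(1)
--     # lookup per candidate and no sort over the map.
--     starts = [0] + [j + 1 for j, ch in enumerate(slug) if ch == '-']
--     for i in starts:
--         tail = slug[i:]
--         if tail in SERVICE_MAP:
--             return '/' + slug[:i] + SERVICE_MAP[tail]
--
--     return path
-- ===== Notes on version B (the rewrite author's own statement) =====
-- stated objective: alternative
-- what changed: B drops A's separate exact-service branch and its per-call sort of SERVICE_MAP with an endswith test per entry; instead it enumerates the candidate start positions of the slug (0 and each position after a dash) and does one O(1) dict lookup per candidate, longest suffix first, which reproduces A's longest-key-first behaviour; the '-movers' branch may precede the service lookup because no SERVICE_MAP key ends in '-movers'.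
import Mathlib
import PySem

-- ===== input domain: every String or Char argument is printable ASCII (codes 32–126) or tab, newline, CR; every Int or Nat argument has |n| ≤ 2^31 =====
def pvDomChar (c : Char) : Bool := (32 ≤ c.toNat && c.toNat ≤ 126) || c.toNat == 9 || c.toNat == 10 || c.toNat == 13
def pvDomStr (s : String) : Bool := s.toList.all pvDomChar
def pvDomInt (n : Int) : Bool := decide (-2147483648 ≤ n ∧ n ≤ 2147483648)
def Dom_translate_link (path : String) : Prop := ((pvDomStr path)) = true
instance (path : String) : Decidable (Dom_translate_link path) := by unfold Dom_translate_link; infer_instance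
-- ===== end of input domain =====

-- B replaces A's exact-service branch plus per-call sort of SERVICE_MAP (endswith test per entry)
-- by one pass over the slug's candidate start positions with an O(1) map lookup each (objective: alternative).

-- ===== PORT A =====
def STATIC_MAP : PySem.Dict String String :=
  PySem.Dict.ofList [("about-us", "sobre-nosotros"), ("contact-us", "contacto"), ("quote", "cotizacion"), ("reservations", "reservaciones"), ("services", "servicios"), ("locations", "ubicaciones"), ("reviews", "resenas"), ("faq", "preguntas-frecuentes"), ("moving-rates", "tarifas-de-mudanza"), ("moving-routes", "rutas-de-mudanza"), ("moving-tips", "consejos-de-mudanza"), ("moving-checklist", "lista-de-mudanza"), ("moving-glossary", "glosario-de-mudanza"), ("why-choose-us", "por-que-elegirnos"), ("compare", "comparar"), ("alternatives", "alternativas"), ("privacy", "privacidad"), ("terms", "terminos")]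

def SERVICE_MAP : PySem.Dict String String :=
  PySem.Dict.ofList [("packing-services", "servicios-de-empaque"), ("local-moving", "mudanza-local"), ("long-distance-moving", "mudanza-de-larga-distancia"), ("residential-moving", "mudanza-residencial"), ("commercial-moving", "mudanza-comercial"), ("furniture-moving", "mudanza-de-muebles"), ("celebrity-moving", "mudanza-de-celebridades"), ("apartment-moving", "mudanza-de-apartamentos"), ("full-service-moving", "mudanza-de-servicio-completo"), ("labor-only-moving", "mudanza-solo-mano-de-obra"), ("military-moving", "mudanza-militar"), ("same-day-moving", "mudanza-del-mismo-dia"), ("senior-moving", "mudanza-para-personas-mayores"), ("student-moving", "mudanza-estudiantil"), ("safe-moving", "mudanza-de-cajas-fuertes"), ("antique-moving", "mudanza-de-antiguedades"), ("office-moving", "mudanza-de-oficinas"), ("same-building-moving", "mudanza-dentro-del-mismo-edificio"), ("last-minute-moving", "mudanza-de-ultimo-momento"), ("hourly-moving", "mudanza-por-hora"), ("special-needs-moving", "mudanza-para-necesidades-especiales"), ("appliance-moving", "mudanza-de-electrodomesticos"), ("piano-moving", "mudanza-de-pianos"), ("pool-table-moving", "mudanza-de-mesas-de-billar"), ("hot-tub-moving",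 "mudanza-de-jacuzzis"), ("art-moving", "mudanza-de-arte"), ("white-glove-moving", "mudanza-de-guante-blanco"), ("specialty-item-moving", "mudanza-de-articulos-especiales"), ("storage-solutions", "soluciones-de-almacenamiento"), ("junk-removal", "retiro-de-basura"), ("long-distance", "mudanza-de-larga-distancia"), ("furniture-assembly", "ensamblaje-de-muebles"), ("heavy-item-moving", "mudanza-de-articulos-pesados")]

-- A's step-4 for-loop over the sorted items: first entry whose '-'+key is a suffix wins
def aLoop (slug : List Char) : List (String × String) → Option (List Char)
  | [] => none
  | (en, es) :: rest =>
    if PySem.Chars.endswith slug ('-' :: en.toList) then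
      -- '/' + slug[:-(len(en)+1)] + '-' + es
      some (['/'] ++ PySem.List.slice slug none (some (-((en.toList.length + 1 : Nat) : Int))) ++ ['-'] ++ es.toList)
    else aLoop slug rest

def translate_link (path : String) : String :=
  -- path.lstrip('/'): hand port, exact — drops exactly the leading '/' characters
  let slug := path.toList.dropWhile (fun c => c == '/')
  if STATIC_MAP.contains (String.ofList slug) then
    String.ofList (['/'] ++ (STATIC_MAP.getD (String.ofList slug) "").toList)
  else if SERVICE_MAP.contains (String.ofList slug) then
    String.ofList (['/'] ++ (SERVICE_MAP.getD (String.ofList slug) "").toList)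
  else if PySem.Chars.endswith slug ("-movers".toList) then
    String.ofList ("/mudanzas-".toList ++ PySem.List.slice slug none (some (-7)))
  else
    match aLoop slug (PySem.List.sorted SERVICE_MAP.items (fun x => PySem.Str.len x.1) true) with
    | some r => String.ofList r
    | none => path

-- ===== PORT B =====
-- '[0] + [j + 1 for j, ch in enumerate(slug) if ch == '-']'
def bStarts (slug : List Char) : List Int :=
  0 :: ((PySem.List.enumerate slug 0).filter (fun p => p.2 == '-')).map (fun p => p.1 + 1)

-- B's for-loop over the candidate start positions: first start whose tail is a key wins
def bFind (slug : List Char) : List Int → Option (List Char)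
  | [] => none
  | i :: rest =>
    let tail := PySem.List.slice slug (some i) none
    if SERVICE_MAP.contains (String.ofList tail) then
      -- '/' + slug[:i] + SERVICE_MAP[tail]
      some ('/' :: PySem.List.slice slug none (some i) ++ (SERVICE_MAP.getD (String.ofList tail) "").toList)
    else bFind slug rest

def translate_link_alt (path : String) : String :=
  -- path.lstrip('/'): hand port, exact — drops exactly the leading '/' characters
  let slug := path.toList.dropWhile (fun c => c == '/')
  if STATIC_MAP.contains (String.ofList slug) then
    String.ofList ('/' :: (STATIC_MAP.getD (String.ofList slug) "").toList)
  else if PySem.Chars.endswith slug ("-movers".toList) then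
    String.ofList ("/mudanzas-".toList ++ PySem.List.slice slug none (some (-7)))
  else
    match bFind slug (bStarts slug) with
    | some r => String.ofList r
    | none => path

-- ===== PRECONDITION & SPEC =====
def Spec_translate_link (path : String) (out : String) : Prop := out = translate_link_alt path
instance (path : String) (out : String) : Decidable (Spec_translate_link path out) := by unfold Spec_translate_link; infer_instance

-- ===== CLAIM (what is proved, stated in full; the proofs are below) =====
def Claim_equal_translate_link : Prop := ∀ (path : String), Dom_translate_link path → Spec_translate_link path (translate_link path)

-- ===== LEMMAS AND PROOFS =====

-- no SERVICE_MAP key ends in '-movers' (justifies B checking '-movers' before the service lookup)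
set_option maxRecDepth 100000 in
theorem service_key_not_movers (s : String) (h : SERVICE_MAP.contains s = true) :
    PySem.Chars.endswith s.toList ("-movers".toList) = false := by
  have hall : SERVICE_MAP.keys.all (fun k => !PySem.Chars.endswith k.toList ("-movers".toList)) = true := by decide
  have hm := (PySem.Dict.contains_iff_mem_keys _ _).mp h
  have := List.all_eq_true.mp hall s hm
  simpa using this

-- two suffixes of the same list with equal length coincide
theorem suffix_eq_of_length_eq {s1 s2 rest : List Char} (h1 : s1 <:+ rest)
    (h2 : s2 <:+ rest) (h : s1.length = s2.length) : s1 = s2 := by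
  obtain ⟨a, rfl⟩ := h1
  obtain ⟨b, hb⟩ := h2
  have hl : a.length = b.length := by
    have := congrArg List.length hb
    simp at this
    omega
  exact (List.append_inj' hb.symm h).2

theorem aLoop_some_inv (l : List (String × String)) (slug : List Char) (r : List Char)
    (hpw : l.Pairwise (fun a b => b.1.toList.length ≤ a.1.toList.length))
    (h : aLoop slug l = some r) :
    ∃ en es, (en, es) ∈ l ∧ PySem.Chars.endswith slug ('-' :: en.toList) = true ∧
      r = ['/'] ++ PySem.List.slice slug none (some (-((en.toList.length + 1 : Nat) : Int))) ++ ['-'] ++ es.toList ∧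
      ∀ p ∈ l, PySem.Chars.endswith slug ('-' :: p.1.toList) = true → p.1.toList.length ≤ en.toList.length := by
  induction l with
  | nil => exact absurd h (by simp [aLoop])
  | cons hd t ih =>
    obtain ⟨en0, es0⟩ := hd
    by_cases hm : PySem.Chars.endswith slug ('-' :: en0.toList) = true
    · refine ⟨en0, es0, List.mem_cons_self, hm, ?_, ?_⟩
      · rw [aLoop, if_pos hm] at h
        exact (Option.some.injEq _ _ ▸ h :).symm
      · intro p hp _
        rcases List.mem_cons.mp hp with rfl | hp'
        · exact le_refl _
        · exact (List.pairwise_cons.mp hpw).1 p hp'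
    · rw [aLoop, if_neg hm] at h
      obtain ⟨en, es, hmem, hend, hr, hmax⟩ := ih (List.pairwise_cons.mp hpw).2 h
      refine ⟨en, es, List.mem_cons_of_mem _ hmem, hend, hr, ?_⟩
      intro p hp hpend
      rcases List.mem_cons.mp hp with rfl | hp'
      · exact absurd hpend hm
      · exact hmax p hp' hpend

theorem aLoop_none_inv (l : List (String × String)) (slug : List Char)
    (h : aLoop slug l = none) :
    ∀ p ∈ l, PySem.Chars.endswith slug ('-' :: p.1.toList) = false := by
  induction l with
  | nil => intro p hp; exact absurd hp List.not_mem_nil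
  | cons hd t ih =>
    intro p hp
    obtain ⟨en0, es0⟩ := hd
    by_cases hm : PySem.Chars.endswith slug ('-' :: en0.toList) = true
    · rw [aLoop, if_pos hm] at h; exact absurd h (by simp)
    · rw [aLoop, if_neg hm] at h
      rcases List.mem_cons.mp hp with rfl | hp'
      · exact Bool.not_eq_true _ ▸ hm
      · exact ih h p hp'

-- membership in B's dash-start list
theorem mem_dashStarts (slug : List Char) (x : Int) :
    x ∈ ((PySem.List.enumerate slug 0).filter (fun p => p.2 == '-')).map (fun p => p.1 + 1) ↔
    ∃ (m : Nat) (h : m < slug.length), slug[m] = '-' ∧ x = (m : Int) + 1 := by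
  simp only [List.mem_map, List.mem_filter, PySem.List.mem_enumerate_iff]
  constructor
  · rintro ⟨p, ⟨⟨k, hk, rfl⟩, hdash⟩, rfl⟩
    exact ⟨k, hk, by simpa using hdash, by simp⟩
  · rintro ⟨m, hm, hdash, rfl⟩
    exact ⟨((m : Int), slug[m]), ⟨⟨m, hm, by simp⟩, by simpa using hdash⟩, by simp⟩

-- B's loop: first start that hits the map wins
theorem bFind_some (slug : List Char) (is : List Int) (i₀ : Int)
    (hsorted : is.Pairwise (· < ·)) (hmem : i₀ ∈ is)
    (hhit : SERVICE_MAP.contains (String.ofList (PySem.List.slice slug (some i₀) none)) = true)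
    (hmin : ∀ j ∈ is, j < i₀ →
      SERVICE_MAP.contains (String.ofList (PySem.List.slice slug (some j) none)) = false) :
    bFind slug is = some ('/' :: PySem.List.slice slug none (some i₀) ++
      (SERVICE_MAP.getD (String.ofList (PySem.List.slice slug (some i₀) none)) "").toList) := by
  induction is with
  | nil => exact absurd hmem List.not_mem_nil
  | cons h t ih =>
    by_cases he : h = i₀
    · subst he
      rw [bFind, if_pos hhit]
    · have hmem' : i₀ ∈ t := by
        rcases List.mem_cons.mp hmem with rfl | h'
        · exact absurd rfl he
        · exact h'
      have hlt : h < i₀ := (List.pairwise_cons.mp hsorted).1 i₀ hmem'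
      rw [bFind, if_neg (by rw [hmin h List.mem_cons_self hlt]; simp)]
      exact ih (List.pairwise_cons.mp hsorted).2 hmem'
        (fun j hj => hmin j (List.mem_cons_of_mem _ hj))

theorem bFind_none (slug : List Char) (is : List Int)
    (h : ∀ j ∈ is, SERVICE_MAP.contains (String.ofList (PySem.List.slice slug (some j) none)) = false) :
    bFind slug is = none := by
  induction is with
  | nil => rfl
  | cons i t ih =>
    rw [bFind, if_neg (by rw [h i List.mem_cons_self]; simp)]
    exact ih (fun j hj => h j (List.mem_cons_of_mem _ hj))

-- dash starts are strictly increasing (so bFind's first hit is the minimal start = longest tail)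
theorem dashStarts_sorted (slug : List Char) :
    (((PySem.List.enumerate slug 0).filter (fun p => p.2 == '-')).map (fun p => p.1 + 1)).Pairwise (· < ·) := by
  refine List.Pairwise.map _ ?_ (List.Pairwise.sublist List.filter_sublist (PySem.List.pairwise_lt_enumerate slug 0))
  intro a b hab
  omega

-- a SERVICE_MAP key that is a string of chars: membership in items from contains
theorem contains_exists_item (k : List Char)
    (h : SERVICE_MAP.contains (String.ofList k) = true) :
    ∃ v, (String.ofList k, v) ∈ SERVICE_MAP.items := by
  have hmem := (PySem.Dict.contains_iff_mem_keys _ _).mp h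
  simp only [PySem.Dict.keys] at hmem
  obtain ⟨p, hp, he⟩ := List.mem_map.mp hmem
  exact ⟨p.2, by rw [← he]; exact Prod.mk.eta ▸ hp⟩

-- the two step-4 computations agree (given the slug itself is not a key — A's branch 2 already ruled it out)
theorem loop_eq (slug : List Char)
    (hns : SERVICE_MAP.contains (String.ofList slug) = false) :
    (match aLoop slug (PySem.List.sorted SERVICE_MAP.items (fun x => PySem.Str.len x.1) true) with
      | some r => some r
      | none => (none : Option (List Char))) =
    bFind slug (bStarts slug) := by
  have hnd : SERVICE_MAP.keys.Nodup := PySem.Dict.nodup_keys_ofList _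
  have hpw : (PySem.List.sorted SERVICE_MAP.items (fun x => PySem.Str.len x.1) true).Pairwise
      (fun a b => b.1.toList.length ≤ a.1.toList.length) := by
    refine (PySem.List.sorted_pairwise_rev SERVICE_MAP.items (fun x => PySem.Str.len x.1)).imp ?_
    intro a b hab
    simpa [PySem.Str.len_eq] using hab
  -- unfold B's head candidate (start 0 = the whole slug, not a key by hns)
  have hslice0 : PySem.List.slice slug (some (0:Int)) none = slug := by
    simp [PySem.List.slice_none_none]
  rw [show bStarts slug = (0:Int) :: _ from rfl, bFind, if_neg (by rw [hslice0, hns]; simp)]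
  cases h : aLoop slug (PySem.List.sorted SERVICE_MAP.items (fun x => PySem.Str.len x.1) true) with
  | none =>
    have hall := aLoop_none_inv _ slug h
    rw [bFind_none]
    intro j hj
    obtain ⟨m, hm, hdash, rfl⟩ := (mem_dashStarts slug j).mp hj
    by_contra hc
    have hc' : SERVICE_MAP.contains (String.ofList (PySem.List.slice slug (some ((m:Int)+1)) none)) = true := by
      revert hc; cases SERVICE_MAP.contains (String.ofList (PySem.List.slice slug (some ((m:Int)+1)) none)) <;> simp
    rw [show ((m:Int)+1) = ((m+1 : Nat) : Int) from by push_cast; ring,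
        PySem.List.slice_from_natCast] at hc'
    obtain ⟨v, hv⟩ := contains_exists_item _ hc'
    have hin := (PySem.List.mem_sorted SERVICE_MAP.items (fun x => PySem.Str.len x.1) true _).mpr hv
    have hend := hall _ hin
    have hsuf : ('-' :: (slug.drop (m+1))) <:+ slug := by
      rw [← hdash, ← List.drop_eq_getElem_cons hm]
      exact List.drop_suffix m slug
    rw [show (String.ofList (slug.drop (m+1)), v).1.toList = slug.drop (m+1) from by
          simp [String.toList_ofList],
        (PySem.Chars.endswith_iff slug _).mpr hsuf] at hend
    exact Bool.true_eq_false ▸ hend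
  | some r =>
    obtain ⟨en, es, hmem, hend, hr, hmax⟩ := aLoop_some_inv _ slug r hpw h
    set k := en.toList with hk
    have hsuf : ('-' :: k) <:+ slug := (PySem.Chars.endswith_iff _ _).mp hend
    have hklen : k.length + 1 ≤ slug.length := by
      have := List.IsSuffix.length_le hsuf; simpa using this
    -- the start position of A's match
    set m : Nat := slug.length - (k.length + 1) with hmdef
    have hm : m < slug.length := by omega
    have hdropm : slug.drop m = '-' :: k := by
      refine suffix_eq_of_length_eq (List.drop_suffix m slug) hsuf ?_
      simp [hmdef]; omega
    have hdash : slug[m] = '-' := by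
      have := List.drop_eq_getElem_cons hm (l := slug)
      rw [hdropm] at this
      exact (List.cons.injEq _ _ _ _ ▸ this.symm).1
    have hdropm1 : slug.drop (m+1) = k := by
      have := List.drop_eq_getElem_cons hm (l := slug)
      rw [hdropm, hdash] at this
      exact (List.cons.injEq _ _ _ _ ▸ this.symm).2
    have hi0mem : ((m:Int)+1) ∈ ((PySem.List.enumerate slug 0).filter (fun p => p.2 == '-')).map (fun p => p.1 + 1) :=
      (mem_dashStarts slug _).mpr ⟨m, hm, hdash, rfl⟩
    have hsliceI : PySem.List.slice slug (some ((m:Int)+1)) none = k := by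
      rw [show ((m:Int)+1) = ((m+1 : Nat) : Int) from by push_cast; ring,
          PySem.List.slice_from_natCast, hdropm1]
    have hv0 : SERVICE_MAP.get? en = some es :=
      PySem.Dict.get?_of_mem_items _ ((PySem.List.mem_sorted _ _ _ _).mp hmem) hnd
    have hvk : SERVICE_MAP.get? (String.ofList k) = some es := by
      rw [hk, String.ofList_toList]; exact hv0
    have hhit : SERVICE_MAP.contains (String.ofList (PySem.List.slice slug (some ((m:Int)+1)) none)) = true := by
      rw [hsliceI, PySem.Dict.contains_eq_isSome_get?, hvk]; rfl
    rw [bFind_some slug _ ((m:Int)+1) (dashStarts_sorted slug) hi0mem hhit]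
    · -- result values agree
      rw [hsliceI, PySem.Dict.getD_of_get?_eq_some _ "" hvk, hr]
      rw [PySem.List.slice_to_neg_natCast slug (k.length + 1) (by omega)]
      rw [show ((m:Int)+1) = ((m+1 : Nat) : Int) from by push_cast; ring,
          PySem.List.slice_to_natCast]
      have htake : slug.take (slug.length - (k.length + 1) + 1) =
          slug.take (slug.length - (k.length + 1)) ++ ['-'] := by
        rw [List.take_add_one, List.getElem?_eq_getElem hm, hdash]; rfl
      rw [htake]
      simp
    · -- minimality: any earlier dash start would be a longer key, contradicting hmax
      intro j hj hjlt
      obtain ⟨m', hm', hdash', rfl⟩ := (mem_dashStarts slug j).mp hj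
      by_contra hc
      have hc' : SERVICE_MAP.contains (String.ofList (PySem.List.slice slug (some ((m':Int)+1)) none)) = true := by
        revert hc; cases SERVICE_MAP.contains (String.ofList (PySem.List.slice slug (some ((m':Int)+1)) none)) <;> simp
      rw [show ((m':Int)+1) = ((m'+1 : Nat) : Int) from by push_cast; ring,
          PySem.List.slice_from_natCast] at hc'
      obtain ⟨v, hv⟩ := contains_exists_item _ hc'
      have hin := (PySem.List.mem_sorted SERVICE_MAP.items (fun x => PySem.Str.len x.1) true _).mpr hv
      have hsuf' : ('-' :: (slug.drop (m'+1))) <:+ slug := by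
        rw [← hdash', ← List.drop_eq_getElem_cons hm']
        exact List.drop_suffix m' slug
      have hle := hmax _ hin (by
        rw [show (String.ofList (slug.drop (m'+1)), v).1.toList = slug.drop (m'+1) from by
              simp [String.toList_ofList]]
        exact (PySem.Chars.endswith_iff slug _).mpr hsuf')
      rw [show (String.ofList (slug.drop (m'+1)), v).1.toList = slug.drop (m'+1) from by
            simp [String.toList_ofList]] at hle
      have hlen' : (slug.drop (m'+1)).length = slug.length - (m'+1) := by simp
      have : m' + 1 < m + 1 := by exact_mod_cast hjlt
      rw [hlen'] at hle
      omega

-- ===== VERDICT (by name: the statement is the Claim_ definition above) =====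
theorem translate_link_spec : Claim_equal_translate_link := by
  intro path _
  unfold Spec_translate_link translate_link translate_link_alt
  set slug := path.toList.dropWhile (fun c => c == '/') with hslug
  by_cases hst : STATIC_MAP.contains (String.ofList slug) = true
  · simp [hst]
  · rw [if_neg hst, if_neg hst]
    by_cases hsv : SERVICE_MAP.contains (String.ofList slug) = true
    · -- A's exact-service branch: B skips '-movers' (no key ends in it) and hits start 0
      rw [if_pos hsv, if_neg (by
        have := service_key_not_movers (String.ofList slug) hsv
        rw [String.toList_ofList] at this
        simpa using this)]
      have hslice0 : PySem.List.slice slug (some (0:Int)) none = slug := by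
        simp [PySem.List.slice_none_none]
      rw [show bStarts slug = (0:Int) :: _ from rfl, bFind, if_pos (by rw [hslice0]; exact hsv)]
      rw [hslice0]
      rw [show (0:Int) = ((0:Nat):Int) from rfl, PySem.List.slice_to_natCast]
      simp
    · rw [if_neg hsv]
      by_cases hmv : PySem.Chars.endswith slug ("-movers".toList) = true
      · rw [if_pos hmv, if_pos hmv]
      · rw [if_neg hmv, if_neg hmv]
        have hns : SERVICE_MAP.contains (String.ofList slug) = false := by
          revert hsv; cases SERVICE_MAP.contains (String.ofList slug) <;> simp
        have := loop_eq slug hns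
        cases h : aLoop slug (PySem.List.sorted SERVICE_MAP.items (fun x => PySem.Str.len x.1) true) with
        | none => rw [h] at this; rw [← this]
        | some r => rw [h] at this; rw [← this]
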